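-- pv_equiv track=rewrite | github.com/ekeilty17/Advent-of-Code | 2016/Day_25/part_1_disassembled.py | disassembled
-- ===== SOURCE A (Python) =====
-- from typing import Dict, Tuple, List
--
-- def disassembled(a: int, b: int, c: int, d: int, N: int=10) -> Tuple[int, int, int, int, List[int]]:
--     output = []
--
--     # chunk 1
--     d = a
--     c = 4
--
--     # chunk 2
--     while c != 0:
--         b = 643
--         while b != 0:
--             d += 1
--             b -= 1
--         c -= 1
--
--     # chunk 3
--     #   Obviously I can't simulate an infinite loop,
--     #   so the variable N defines the number of times the `while True` runs
--     # while True: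
--     for _ in range(N):
--         a = d
--
--         # chunk 3.1
--         while a != 0:
--             b = a
--             a = 0
--
--             # chunk 3.1.1
--             c = 2
--             while b != 0:
--                 b -= 1
--                 c -= 1
--                 if c == 0:
--                     a += 1
--                     c = 2
--
--             # chunk 3.1.2
--             b = 2
--             while c != 0:
--                 b -= 1
--                 c -= 1
--
--             # chunk 3.1.3
--             output.append(b)
--
--     return a, b, c, d, output
-- ===== SOURCE B (Python) =====
-- def disassembled(a, b, c, d, N=10):
--     d = a + 2572
--     if N <= 0:
--         return a, 0, 0, d, []
--     if d == 0:
--         return 0, 0, 0, 0, []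
--     bits = []
--     v = d
--     while v > 0:
--         bits.append(v % 2)
--         v //= 2
--     return 0, 1, 0, d, bits * N
-- ===== Notes on version B (the rewrite author's own statement) =====
-- stated objective: faster
-- what changed: B replaces the whole register-machine simulation (unary counting loops for +2572, pairwise decrement loops to halve and take parity) by direct arithmetic: d = a+2572, extract its binary digits with %2 and //2, replicate the digit list N times, and write the final registers (0,1,0) in closed form.
import Mathlib
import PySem

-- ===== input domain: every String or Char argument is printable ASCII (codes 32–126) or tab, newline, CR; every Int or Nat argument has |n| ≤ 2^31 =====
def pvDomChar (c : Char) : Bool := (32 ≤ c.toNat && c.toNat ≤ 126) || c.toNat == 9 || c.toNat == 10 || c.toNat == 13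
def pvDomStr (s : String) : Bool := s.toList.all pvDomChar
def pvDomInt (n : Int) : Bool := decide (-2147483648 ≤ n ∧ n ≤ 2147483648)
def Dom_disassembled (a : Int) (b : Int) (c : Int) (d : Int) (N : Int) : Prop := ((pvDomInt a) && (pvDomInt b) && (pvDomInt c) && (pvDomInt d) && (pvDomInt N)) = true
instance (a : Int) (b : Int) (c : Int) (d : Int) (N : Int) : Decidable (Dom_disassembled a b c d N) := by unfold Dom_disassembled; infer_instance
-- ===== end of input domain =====

-- B replaces A's unary register-machine simulation by direct binary-digit arithmetic (faster);
-- equivalence is proved on Pre_ (N ≤ 0 or a+2572 ≥ 0), exactly where A terminates.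
-- Each while-loop is ported with a Nat fuel equal to the loop's iteration count (a totality
-- guard only: with the fuel the ports compute exactly what their Python computes wherever it returns).

-- ===== PORT A =====
-- chunk 2 inner: `while b != 0: d += 1; b -= 1` (runs b times; called with b = 643)
def c2Inner : Nat → Int → Int → Int × Int
  | 0, b, d => (b, d)
  | fuel + 1, b, d => if b = 0 then (b, d) else c2Inner fuel (b - 1) (d + 1)

-- chunk 2 outer: `while c != 0: b = 643; <inner>; c -= 1` (c starts at 4)
def c2Outer : Nat → Int → Int → Int → Int × Int × Int
  | 0, c, b, d => (c, b, d)
  | fuel + 1, c, b, d =>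
    if c = 0 then (c, b, d)
    else
      let p := c2Inner 643 643 d
      c2Outer fuel (c - 1) p.1 p.2

-- chunk 3.1.1: `while b != 0: b -= 1; c -= 1; if c == 0: a += 1; c = 2`; returns (a, c), b ends 0
def c311 : Nat → Int → Int → Int → Int × Int
  | 0, _b, a, c => (a, c)
  | fuel + 1, b, a, c =>
    if b = 0 then (a, c)
    else if c - 1 = 0 then c311 fuel (b - 1) (a + 1) 2 else c311 fuel (b - 1) a (c - 1)

-- chunk 3.1.2: `while c != 0: b -= 1; c -= 1`; returns (b, c)
def c312 : Nat → Int → Int → Int × Int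
  | 0, b, c => (b, c)
  | fuel + 1, b, c => if c = 0 then (b, c) else c312 fuel (b - 1) (c - 1)

-- chunk 3.1: `while a != 0: b = a; a = 0; <3.1.1>; b = 2; <3.1.2>; output.append(b)`
def c31 : Nat → Int → Int → Int → List Int → Int × Int × Int × List Int
  | 0, a, b, c, out => (a, b, c, out)
  | fuel + 1, a, b, c, out =>
    if a = 0 then (a, b, c, out)
    else
      let p := c311 a.toNat a 0 2
      let q := c312 p.2.toNat 2 p.2
      c31 fuel p.1 q.1 q.2 (out ++ [q.1])

-- chunk 3: `for _ in range(N)` over the state (a, b, c, out) with d fixed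
def loopFor (d : Int) : Nat → Int × Int × Int × List Int → Int × Int × Int × List Int
  | 0, s => s
  | k + 1, (_a, b, c, out) =>
    let r := c31 d.toNat d b c out
    loopFor d k (r.1, r.2.1, r.2.2.1, r.2.2.2)

def disassembled (a : Int) (b : Int) (c : Int) (d : Int) (N : Int) : Int × Int × Int × Int × List Int :=
  -- chunk 1: d = a; c = 4; chunk 2; chunk 3
  let s2 := c2Outer 4 4 b a
  let s3 := loopFor s2.2.2 N.toNat (a, s2.2.1, s2.1, [])
  (s3.1, s3.2.1, s3.2.2.1, s2.2.2, s3.2.2.2)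

-- ===== PORT B =====
-- `while v > 0: bits.append(v % 2); v //= 2` (fuel v.toNat: the loop runs at most that often)
def bitsLoop : Nat → Int → List Int → List Int
  | 0, _v, acc => acc
  | fuel + 1, v, acc => if 0 < v then bitsLoop fuel (v / 2) (acc ++ [v % 2]) else acc

def disassembled_alt (a : Int) (b : Int) (c : Int) (d : Int) (N : Int) : Int × Int × Int × Int × List Int :=
  let d' := a + 2572
  if N ≤ 0 then (a, 0, 0, d', [])
  else if d' = 0 then (0, 0, 0, 0, [])
  else (0, 1, 0, d', (List.replicate N.toNat (bitsLoop d'.toNat d' [])).flatten)  -- bits * N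

-- ===== PRECONDITION & SPEC =====
-- Pre_ excludes exactly the inputs where Python A diverges: N ≥ 1 with a + 2572 < 0 makes
-- the inner decrement loops run on a negative counter forever; A never returns there.
def Pre_disassembled (a : Int) (b : Int) (c : Int) (d : Int) (N : Int) : Prop := N ≤ 0 ∨ 0 ≤ a + 2572
instance (a : Int) (b : Int) (c : Int) (d : Int) (N : Int) : Decidable (Pre_disassembled a b c d N) := by unfold Pre_disassembled; infer_instance
def pvWitness_disassembled : Int × Int × Int × Int × Int := (5, 0, 0, 0, 3)

def Spec_disassembled (a : Int) (b : Int) (c : Int) (d : Int) (N : Int) (out : Int × Int × Int × Int × List Int) : Prop := out = disassembled_alt a b c d N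
instance (a : Int) (b : Int) (c : Int) (d : Int) (N : Int) (out : Int × Int × Int × Int × List Int) : Decidable (Spec_disassembled a b c d N out) := by unfold Spec_disassembled; infer_instance

-- ===== CLAIM (what is proved, stated in full; the proofs are below) =====
def Claim_equal_disassembled : Prop := ∀ (a : Int) (b : Int) (c : Int) (d : Int) (N : Int), Dom_disassembled a b c d N → Pre_disassembled a b c d N → Spec_disassembled a b c d N (disassembled a b c d N)

-- ===== LEMMAS AND PROOFS =====

theorem c2Inner_spec (n : Nat) : ∀ (b d : Int), b.toNat = n → 0 ≤ b →
    c2Inner n b d = (0, d + b) := by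
  induction n with
  | zero =>
    intro b d hn hb
    simp only [c2Inner, Prod.mk.injEq]
    omega
  | succ k ih =>
    intro b d hn hb
    rw [c2Inner, if_neg (by omega), ih (b - 1) (d + 1) (by omega) (by omega)]
    simp only [Prod.mk.injEq, true_and]
    omega

theorem c2Outer_spec (b d : Int) : c2Outer 4 4 b d = (0, 0, d + 2572) := by
  have h := fun d => c2Inner_spec 643 643 d rfl (by norm_num)
  show c2Outer (3+1) 4 b d = _
  rw [c2Outer, if_neg (by norm_num)]
  simp only [h]
  show c2Outer (2+1) 3 0 (d + 643) = _
  rw [c2Outer, if_neg (by norm_num)]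
  simp only [h]
  show c2Outer (1+1) 2 0 (d + 643 + 643) = _
  rw [c2Outer, if_neg (by norm_num)]
  simp only [h]
  show c2Outer (0+1) 1 0 (d + 643 + 643 + 643) = _
  rw [c2Outer, if_neg (by norm_num)]
  simp only [h, c2Outer, Prod.mk.injEq, true_and]
  norm_num
  omega

theorem c311_spec (n : Nat) : ∀ (v a : Int), v.toNat = n → 0 ≤ v →
    c311 n v a 2 = (a + v / 2, 2 - v % 2) := by
  induction n using Nat.strong_induction_on with
  | _ n ih =>
    intro v a hn hv
    rcases eq_or_lt_of_le hv with h0 | hpos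
    · have : n = 0 := by omega
      subst this
      simp only [c311, Prod.mk.injEq]
      omega
    · obtain ⟨k, hk⟩ : ∃ k, n = k + 1 := ⟨n - 1, by omega⟩
      subst hk
      rw [c311, if_neg (by omega)]
      simp only [show (2:Int) - 1 = 1 by norm_num, if_neg (by norm_num : ¬ (1:Int) = 0)]
      rcases eq_or_lt_of_le (show (1:Int) ≤ v by omega) with h1 | h2
      · have : k = 0 := by omega
        subst this
        simp only [c311, Prod.mk.injEq]
        omega
      · obtain ⟨m, hm⟩ : ∃ m, k = m + 1 := ⟨k - 1, by omega⟩
        subst hm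
        rw [c311, if_neg (by omega), if_pos (by norm_num : (1:Int) - 1 = 0)]
        rw [ih m (by omega) (v - 1 - 1) (a + 1) (by omega) (by omega)]
        simp only [Prod.mk.injEq]
        omega

theorem c312_spec (n : Nat) : ∀ (b c : Int), c.toNat = n → 0 ≤ c →
    c312 n b c = (b - c, 0) := by
  induction n with
  | zero =>
    intro b c hn hc
    simp only [c312, Prod.mk.injEq]
    omega
  | succ k ih =>
    intro b c hn hc
    rw [c312, if_neg (by omega), ih (b - 1) (c - 1) (by omega) (by omega)]
    simp only [Prod.mk.injEq, and_true]
    omega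

theorem bitsLoop_acc (n : Nat) : ∀ (v : Int) (acc : List Int),
    bitsLoop n v acc = acc ++ bitsLoop n v [] := by
  induction n with
  | zero => intro v acc; simp [bitsLoop]
  | succ k ih =>
    intro v acc
    by_cases h : 0 < v
    · rw [bitsLoop, if_pos h, ih (v / 2)]
      conv_rhs => rw [bitsLoop, if_pos h, ih (v / 2)]
      simp
    · rw [bitsLoop, if_neg h, bitsLoop, if_neg h]
      simp

-- the fuel is a totality guard only: any fuel ≥ the iteration count gives the same list
theorem bitsLoop_fuel (n : Nat) : ∀ (v : Int) (acc : List Int), v.toNat ≤ n →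
    bitsLoop n v acc = bitsLoop v.toNat v acc := by
  induction n using Nat.strong_induction_on with
  | _ n ih =>
    intro v acc hn
    by_cases h : 0 < v
    · obtain ⟨k, hk⟩ : ∃ k, n = k + 1 := ⟨n - 1, by omega⟩
      obtain ⟨j, hj⟩ : ∃ j, v.toNat = j + 1 := ⟨v.toNat - 1, by omega⟩
      subst hk
      rw [bitsLoop, if_pos h, ih k (by omega) (v / 2) _ (by omega), hj,
          bitsLoop, if_pos h, ih j (by omega) (v / 2) _ (by omega)]
    · rw [show v.toNat = 0 by omega]
      cases n with
      | zero => rfl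
      | succ k => simp [bitsLoop, h]

-- `while a != 0` exits immediately on a = 0, whatever the fuel
theorem c31_zeroA (k : Nat) (b c : Int) (out : List Int) : c31 k 0 b c out = (0, b, c, out) := by
  cases k <;> simp [c31]

theorem c31_bits (n : Nat) : ∀ (v b c : Int) (out : List Int), v.toNat ≤ n → 0 < v →
    c31 n v b c out = (0, 1, 0, out ++ bitsLoop v.toNat v []) := by
  induction n using Nat.strong_induction_on with
  | _ n ih =>
    intro v b c out hn hv
    obtain ⟨k, hk⟩ : ∃ k, n = k + 1 := ⟨n - 1, by omega⟩
    subst hk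
    rw [c31, if_neg (by omega)]
    simp only [c311_spec v.toNat v 0 rfl (by omega)]
    rw [c312_spec (2 - v % 2).toNat 2 (2 - v % 2) rfl (by omega)]
    simp only [show (2:Int) - (2 - v % 2) = v % 2 by ring, zero_add]
    obtain ⟨j, hj⟩ : ∃ j, v.toNat = j + 1 := ⟨v.toNat - 1, by omega⟩
    have hbits : bitsLoop v.toNat v [] = v % 2 :: bitsLoop (v / 2).toNat (v / 2) [] := by
      rw [hj, bitsLoop, if_pos hv]
      simp only [List.nil_append]
      rw [bitsLoop_acc j (v / 2) [v % 2], bitsLoop_fuel j (v / 2) [] (by omega)]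
      simp
    rcases eq_or_lt_of_le (show (1:Int) ≤ v by omega) with h1 | h2
    · -- v = 1: the halved value is 0 and the loop exits
      rw [show v / 2 = 0 by omega, c31_zeroA, hbits]
      rw [show v % 2 = 1 by omega, show v / 2 = 0 by omega]
      simp [bitsLoop]
    · -- v ≥ 2: recurse on v / 2 > 0
      rw [ih k (by omega) (v / 2) (v % 2) 0 (out ++ [v % 2]) (by omega) (by omega)]
      rw [hbits]
      simp

theorem loopFor_zero (k : Nat) : ∀ (a b c : Int) (out : List Int),
    loopFor 0 (k + 1) (a, b, c, out) = (0, b, c, out) := by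
  induction k with
  | zero =>
    intro a b c out
    simp [loopFor, c31]
  | succ m ih =>
    intro a b c out
    rw [show m + 1 + 1 = (m + 1) + 1 from rfl, loopFor]
    simp only [show (0:Int).toNat = 0 from rfl, c31]
    exact ih 0 b c out

theorem loopFor_pos (d : Int) (hd : 0 < d) (k : Nat) : ∀ (a b c : Int) (out : List Int),
    loopFor d (k + 1) (a, b, c, out)
      = (0, 1, 0, out ++ (List.replicate (k + 1) (bitsLoop d.toNat d [])).flatten) := by
  induction k with
  | zero =>
    intro a b c out
    rw [loopFor, c31_bits d.toNat d b c out le_rfl hd]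
    simp [loopFor]
  | succ m ih =>
    intro a b c out
    rw [show m + 1 + 1 = (m + 1) + 1 from rfl, loopFor,
        c31_bits d.toNat d b c out le_rfl hd]
    rw [ih 0 1 0 (out ++ bitsLoop d.toNat d [])]
    simp [List.replicate_succ]

-- ===== VERDICT (by name: the statement is the Claim_ definition above) =====
theorem disassembled_spec : Claim_equal_disassembled := by
  intro a b c d N _hdom hpre
  unfold Spec_disassembled disassembled disassembled_alt
  rw [c2Outer_spec]
  simp only
  by_cases hN : N ≤ 0
  · rw [if_pos hN, show N.toNat = 0 by omega]
    simp [loopFor]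
  · rw [if_neg hN]
    have hd : 0 ≤ a + 2572 := by
      rcases hpre with h | h
      · omega
      · exact h
    obtain ⟨k, hk⟩ : ∃ k : Nat, N.toNat = k + 1 := ⟨N.toNat - 1, by omega⟩
    rcases eq_or_lt_of_le hd with h0 | hpos
    · rw [if_pos (by omega : a + 2572 = 0), hk, show a + 2572 = 0 by omega, loopFor_zero]
    · rw [if_neg (by omega : ¬ a + 2572 = 0), hk, loopFor_pos (a + 2572) hpos]
      simp
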